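-- pv_equiv track=rewrite | github.com/AutoMarkGraders/NewsFlix | B/segment_sobi.py | group_boxes_into_full_articles
-- ===== SOURCE A (Python) =====
-- from collections import defaultdict
--
-- def group_boxes_into_full_articles(boxes):
--     """
--     Improved logic to group bounding boxes into full articles, ensuring the heading and content
--     are combined properly.
--     """
--     grouped_boxes = defaultdict(list)
--     current_group = 0
--     threshold_y = 100  # Increased vertical proximity threshold to better group headings and content
--
--     for i, box in enumerate(boxes):
--         x, y, w, h = box
--
--         if i == 0:
--             grouped_boxes[current_group].append(box)
--         else:
--             prev_x, prev_y, prev_w, prev_h = boxes[i - 1]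
--
--             # Check if the current box is close to the previous box vertically or overlaps horizontally
--             if abs(prev_y + prev_h - y) < threshold_y or abs(prev_x - x) < prev_w // 2:
--                 grouped_boxes[current_group].append(box)
--             else:
--                 current_group += 1
--                 grouped_boxes[current_group].append(box)
--
--     return grouped_boxes
-- ===== SOURCE B (Python) =====
-- from collections import defaultdict
--
-- def group_boxes_into_full_articles(boxes):
--     # pass 1: for each box after the first, flag whether it starts a new group
--     starts_new = [
--         not (abs(py + ph - y) < 100 or abs(px - x) < pw // 2)
--         for (px, py, pw, ph), (x, y, w, h) in zip(boxes, boxes[1:])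
--     ]
--     # pass 2: running count of the flags gives each box its group id
--     ids = [0]
--     for f in starts_new:
--         ids.append(ids[-1] + f)
--     # pass 3: assemble the groups
--     grouped = defaultdict(list)
--     for gid, box in zip(ids, boxes):
--         grouped[gid].append(box)
--     return grouped
-- ===== Notes on version B (the rewrite author's own statement) =====
-- stated objective: alternative
-- what changed: The single fused loop that decides new-group-or-same and appends in one go is split into three passes: a boundary-flag pass over consecutive pairs (zip(boxes, boxes[1:])), a running-sum pass turning flags into group ids, and an assembly pass appending each box under its precomputed id.
import Mathlib
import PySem

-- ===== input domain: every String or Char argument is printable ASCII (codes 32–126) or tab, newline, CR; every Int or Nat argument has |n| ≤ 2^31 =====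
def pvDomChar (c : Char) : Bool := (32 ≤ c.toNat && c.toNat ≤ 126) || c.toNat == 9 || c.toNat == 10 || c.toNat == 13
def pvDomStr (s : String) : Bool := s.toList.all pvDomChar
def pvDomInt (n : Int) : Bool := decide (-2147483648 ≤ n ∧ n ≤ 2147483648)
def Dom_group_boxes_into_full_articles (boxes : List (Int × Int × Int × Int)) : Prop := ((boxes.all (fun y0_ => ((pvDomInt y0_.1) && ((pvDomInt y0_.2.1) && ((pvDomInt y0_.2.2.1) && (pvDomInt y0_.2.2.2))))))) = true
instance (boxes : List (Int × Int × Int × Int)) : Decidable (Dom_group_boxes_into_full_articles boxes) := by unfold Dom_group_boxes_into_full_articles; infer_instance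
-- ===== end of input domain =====

-- B replaces A's fused new-group-or-append loop by three passes (pair flags, running group ids, assembly); alternative decomposition, same cost.


-- ===== PORT A =====
-- loop body of A's single fused loop over enumerate(boxes); state = (grouped_boxes, current_group)
def pvAStep (boxes : List (Int × Int × Int × Int))
    (st : PySem.Dict Int (List (Int × Int × Int × Int)) × Int)
    (p : Int × (Int × Int × Int × Int)) :
    PySem.Dict Int (List (Int × Int × Int × Int)) × Int :=
  let (grouped, cur) := st
  let (i, box) := p
  let (x, y, _, _) := box
  if i = 0 then
    (grouped.modify cur [] (· ++ [box]), cur)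
  else
    let (px, py, pw, ph) := PySem.List.pyGetD boxes (i - 1) (0, 0, 0, 0)
    if |py + ph - y| < 100 ∨ |px - x| < PySem.Int.floordiv pw 2 then
      (grouped.modify cur [] (· ++ [box]), cur)
    else
      (grouped.modify (cur + 1) [] (· ++ [box]), cur + 1)

def group_boxes_into_full_articles (boxes : List (Int × Int × Int × Int)) :
    List (Int × List (Int × Int × Int × Int)) :=
  ((PySem.List.enumerate boxes 0).foldl (pvAStep boxes) (PySem.Dict.empty, 0)).1.items

-- ===== PORT B =====
-- pass 1 predicate: does the second box of a consecutive pair start a new group?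
def pvFlag (p : (Int × Int × Int × Int) × (Int × Int × Int × Int)) : Bool :=
  let (px, py, pw, ph) := p.1
  let (x, y, _, _) := p.2
  !(decide (|py + ph - y| < 100 ∨ |px - x| < PySem.Int.floordiv pw 2))

-- pass 2 loop body: ids.append(ids[-1] + f)
def pvIdStep (acc : List Int) (f : Bool) : List Int :=
  acc ++ [PySem.List.pyGetD acc (-1) 0 + (if f then 1 else 0)]

def group_boxes_into_full_articles_alt (boxes : List (Int × Int × Int × Int)) :
    List (Int × List (Int × Int × Int × Int)) :=
  let startsNew := (boxes.zip (PySem.List.slice boxes (some 1) none)).map pvFlag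
  let ids := startsNew.foldl pvIdStep [0]
  ((ids.zip boxes).foldl
      (fun d p => d.modify p.1 [] (· ++ [p.2])) PySem.Dict.empty).items

-- ===== PRECONDITION & SPEC =====
def Spec_group_boxes_into_full_articles (boxes : List (Int × Int × Int × Int)) (out : List (Int × List (Int × Int × Int × Int))) : Prop := out = group_boxes_into_full_articles_alt boxes
instance (boxes : List (Int × Int × Int × Int)) (out : List (Int × List (Int × Int × Int × Int))) : Decidable (Spec_group_boxes_into_full_articles boxes out) := by unfold Spec_group_boxes_into_full_articles; infer_instance

-- ===== CLAIM (what is proved, stated in full; the proofs are below) =====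
def Claim_equal_group_boxes_into_full_articles : Prop := ∀ (boxes : List (Int × Int × Int × Int)), Dom_group_boxes_into_full_articles boxes → Spec_group_boxes_into_full_articles boxes (group_boxes_into_full_articles boxes)

-- ===== LEMMAS AND PROOFS =====

-- common characterisation: walk the tail keeping the previous box and the current group id
def pvAsm (prev : Int × Int × Int × Int) (rest : List (Int × Int × Int × Int))
    (d : PySem.Dict Int (List (Int × Int × Int × Int))) (cur : Int) :
    PySem.Dict Int (List (Int × Int × Int × Int)) × Int :=
  match rest with
  | [] => (d, cur)
  | b :: bs =>
    let (px, py, pw, ph) := prev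
    let (x, y, _, _) := b
    if |py + ph - y| < 100 ∨ |px - x| < PySem.Int.floordiv pw 2 then
      pvAsm b bs (d.modify cur [] (· ++ [b])) cur
    else
      pvAsm b bs (d.modify (cur + 1) [] (· ++ [b])) (cur + 1)

theorem pvIds_append (fs : List Bool) : ∀ (acc : List Int) (c : Int),
    (fs.foldl pvIdStep (acc ++ [c])) = acc ++ fs.foldl pvIdStep [c] := by
  induction fs with
  | nil => intro acc c; rfl
  | cons f fs ih =>
    intro acc c
    have h1 : pvIdStep (acc ++ [c]) f = (acc ++ [c]) ++ [c + (if f then 1 else 0)] := by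
      simp [pvIdStep, PySem.List.pyGetD_neg_one_append_singleton]
    have h2 : pvIdStep [c] f = [c] ++ [c + (if f then 1 else 0)] := by
      have hg : PySem.List.pyGetD [c] (-1) 0 = c := by
        rw [show ([c] : List Int) = [] ++ [c] from rfl, PySem.List.pyGetD_neg_one_append_singleton]
      simp [pvIdStep, hg]
    rw [List.foldl_cons, h1, ih (acc ++ [c]) (c + (if f then 1 else 0)),
      List.foldl_cons, h2, ih [c] (c + (if f then 1 else 0)), List.append_assoc]

theorem pvIds_cons (fs : List Bool) (f : Bool) (c : Int) :
    (f :: fs).foldl pvIdStep [c] = c :: fs.foldl pvIdStep [c + (if f then 1 else 0)] := by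
  have := pvIds_append fs [c] (c + (if f then 1 else 0))
  simpa [pvIdStep, List.foldl_cons] using this

theorem pvIds_head_tail (fs : List Bool) (c : Int) :
    fs.foldl pvIdStep [c] = c :: (fs.foldl pvIdStep [c]).tail := by
  cases fs with
  | nil => rfl
  | cons f fs => rw [pvIds_cons]; rfl

theorem pvB_fold (rest : List (Int × Int × Int × Int)) :
    ∀ (prev : Int × Int × Int × Int) (d : PySem.Dict Int (List (Int × Int × Int × Int))) (cur : Int),
    (((((prev :: rest).zip rest).map pvFlag).foldl pvIdStep [cur]).tail.zip rest).foldl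
        (fun d p => d.modify p.1 [] (· ++ [p.2])) d = (pvAsm prev rest d cur).1 := by
  induction rest with
  | nil => intro prev d cur; rfl
  | cons b bs ih =>
    intro prev d cur
    obtain ⟨px, py, pw, ph⟩ := prev
    obtain ⟨x, y, w, h⟩ := b
    have hflags : (((px, py, pw, ph) :: (x, y, w, h) :: bs).zip ((x, y, w, h) :: bs)).map pvFlag
        = pvFlag ((px, py, pw, ph), (x, y, w, h)) :: (((x, y, w, h) :: bs).zip bs).map pvFlag := by
      simp [List.zip_cons_cons]
    rw [hflags, pvIds_cons]
    set e : Int := (if pvFlag ((px, py, pw, ph), (x, y, w, h)) then 1 else 0) with he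
    -- head of the remaining ids is cur + e
    rw [List.tail_cons, pvIds_head_tail, List.zip_cons_cons, List.foldl_cons]
    rw [ih (x, y, w, h) (d.modify (cur + e) [] (· ++ [(x, y, w, h)])) (cur + e)]
    by_cases hc : |py + ph - y| < 100 ∨ |px - x| < PySem.Int.floordiv pw 2
    · have hf : pvFlag ((px, py, pw, ph), (x, y, w, h)) = false := by
        simp only [pvFlag, Bool.not_eq_false', decide_eq_true_eq]; exact hc
      have he0 : e = 0 := by rw [he, hf]; rfl
      simp only [pvAsm]
      rw [if_pos hc, he0, add_zero]
    · have hf : pvFlag ((px, py, pw, ph), (x, y, w, h)) = true := by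
        simp only [pvFlag, Bool.not_eq_true', decide_eq_false_iff_not]; exact hc
      have he0 : e = 1 := by rw [he, hf]; rfl
      simp only [pvAsm]
      rw [if_neg hc, he0]

theorem pvA_fold (rest : List (Int × Int × Int × Int)) :
    ∀ (front : List (Int × Int × Int × Int)) (prev : Int × Int × Int × Int)
      (d : PySem.Dict Int (List (Int × Int × Int × Int))) (cur : Int),
    front.getLast? = some prev →
    (PySem.List.enumerate rest (front.length : Int)).foldl (pvAStep (front ++ rest)) (d, cur)
      = pvAsm prev rest d cur := by
  induction rest with
  | nil => intro front prev d cur _; rfl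
  | cons b bs ih =>
    intro front prev d cur hlast
    have hfront : front ≠ [] := by intro h; simp [h] at hlast
    have hpos : 0 < front.length := List.length_pos_iff.mpr hfront
    rw [PySem.List.enumerate_cons, List.foldl_cons]
    have hne : ((front.length : Int)) ≠ 0 := by
      simp; omega
    have hidx : ((front.length : Int)) - 1 = ((front.length - 1 : Nat) : Int) := by omega
    have hget : PySem.List.pyGetD (front ++ b :: bs) ((front.length : Int) - 1) (0, 0, 0, 0) = prev := by
      rw [hidx, PySem.List.pyGetD_natCast]
      have hlt : front.length - 1 < front.length := by omega
      rw [List.getD_eq_getElem?_getD, List.getElem?_append_left hlt]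
      rw [List.getLast?_eq_getElem?] at hlast
      simp [hlast]
    obtain ⟨px, py, pw, ph⟩ := prev
    obtain ⟨x, y, w, h⟩ := b
    have hstep : pvAStep (front ++ (x, y, w, h) :: bs) (d, cur) ((front.length : Int), (x, y, w, h))
        = if |py + ph - y| < 100 ∨ |px - x| < PySem.Int.floordiv pw 2 then
            (d.modify cur [] (· ++ [(x, y, w, h)]), cur)
          else
            (d.modify (cur + 1) [] (· ++ [(x, y, w, h)]), cur + 1) := by
      simp only [pvAStep, hne, if_false, hget]
    have harr : front ++ (x, y, w, h) :: bs = (front ++ [(x, y, w, h)]) ++ bs := by simp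
    have hlen : ((front.length : Int)) + 1 = (((front ++ [(x, y, w, h)]).length : Nat) : Int) := by
      rw [List.length_append, List.length_singleton]; push_cast; ring
    have hlast' : (front ++ [(x, y, w, h)]).getLast? = some (x, y, w, h) := by
      simp [List.getLast?_append]
    by_cases hc : |py + ph - y| < 100 ∨ |px - x| < PySem.Int.floordiv pw 2
    · rw [hstep, if_pos hc, harr, hlen, ih (front ++ [(x, y, w, h)]) (x, y, w, h) _ _ hlast']
      simp only [pvAsm]; rw [if_pos hc]
    · rw [hstep, if_neg hc, harr, hlen, ih (front ++ [(x, y, w, h)]) (x, y, w, h) _ _ hlast']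
      simp only [pvAsm]; rw [if_neg hc]

-- ===== VERDICT (by name: the statement is the Claim_ definition above) =====
theorem group_boxes_into_full_articles_spec : Claim_equal_group_boxes_into_full_articles := by
  intro boxes _
  unfold Spec_group_boxes_into_full_articles
  cases boxes with
  | nil => rfl
  | cons b0 rest =>
    have hA : (PySem.List.enumerate rest (1 : Int)).foldl (pvAStep (b0 :: rest))
        (PySem.Dict.empty.modify 0 [] (· ++ [b0]), 0)
        = pvAsm b0 rest (PySem.Dict.empty.modify 0 [] (· ++ [b0])) 0 := by
      have := pvA_fold rest [b0] b0 (PySem.Dict.empty.modify 0 [] (· ++ [b0])) 0 (by simp)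
      simpa using this
    have hstep0 : pvAStep (b0 :: rest) (PySem.Dict.empty, 0) ((0 : Int), b0)
        = (PySem.Dict.empty.modify 0 [] (· ++ [b0]), 0) := by
      obtain ⟨x, y, w, h⟩ := b0; simp [pvAStep]
    simp only [group_boxes_into_full_articles, group_boxes_into_full_articles_alt,
      PySem.List.slice_from_one, List.tail_cons]
    rw [PySem.List.enumerate_cons, List.foldl_cons, hstep0]
    have h01 : (0 : Int) + 1 = 1 := by norm_num
    rw [h01, hA]
    rw [pvIds_head_tail (((b0 :: rest).zip rest).map pvFlag) 0, List.zip_cons_cons,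
      List.foldl_cons, pvB_fold rest b0 (PySem.Dict.empty.modify 0 [] (· ++ [b0])) 0]
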